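-- pv_equiv track=rewrite | github.com/actonbp/sud_council_paper | archive/experimental_python/final_meaningful_topic_model.py | categorize_motivation_phrase
-- ===== SOURCE A (Python) =====
-- def categorize_motivation_phrase(phrase):
--     """Categorize motivational phrases"""
--     if any(word in phrase for word in ['help', 'helping', 'support', 'serve']):
--         return "Helping_Service_Motivation"
--     elif any(word in phrase for word in ['family', 'personal', 'experience', 'parents']):
--         return "Personal_Family_Influence"
--     elif any(word in phrase for word in ['career', 'path', 'professional', 'future']):
--         return "Career_Development"
--     elif any(word in phrase for word in ['difference', 'impact', 'change', 'lives']):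
--         return "Impact_Motivation"
--     elif any(word in phrase for word in ['responsibility', 'important', 'serious']):
--         return "Responsibility_Awareness"
--     elif any(word in phrase for word in ['connection', 'emotional', 'passionate']):
--         return "Emotional_Connection"
--     else:
--         return "Other_Motivation"
-- ===== SOURCE B (Python) =====
-- # Flat keyword->rank map scanned once with a running minimum, then one indexed lookup;
-- # no per-category cascade and no early return.
-- KEYWORD_RANK = {
--     'help': 0, 'helping': 0, 'support': 0, 'serve': 0,
--     'family': 1, 'personal': 1, 'experience': 1, 'parents': 1,
--     'career': 2, 'path': 2, 'professional': 2, 'future': 2,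
--     'difference': 3, 'impact': 3, 'change': 3, 'lives': 3,
--     'responsibility': 4, 'important': 4, 'serious': 4,
--     'connection': 5, 'emotional': 5, 'passionate': 5,
-- }
--
-- CATEGORY_NAMES = [
--     "Helping_Service_Motivation",
--     "Personal_Family_Influence",
--     "Career_Development",
--     "Impact_Motivation",
--     "Responsibility_Awareness",
--     "Emotional_Connection",
--     "Other_Motivation",
-- ]
--
-- def categorize_motivation_phrase(phrase):
--     """Categorize motivational phrases: rank of best matched keyword, 6 if none."""
--     best = len(CATEGORY_NAMES) - 1
--     for word, rank in KEYWORD_RANK.items():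
--         if rank < best and word in phrase:
--             best = rank
--     return CATEGORY_NAMES[best]
-- ===== Notes on version B (the rewrite author's own statement) =====
-- stated objective: alternative
-- what changed: Replaced the six-branch first-match if/elif cascade with one flat scan over a keyword-to-rank dict keeping a running minimum rank, followed by a single indexed lookup into the category-name list.
import Mathlib
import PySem

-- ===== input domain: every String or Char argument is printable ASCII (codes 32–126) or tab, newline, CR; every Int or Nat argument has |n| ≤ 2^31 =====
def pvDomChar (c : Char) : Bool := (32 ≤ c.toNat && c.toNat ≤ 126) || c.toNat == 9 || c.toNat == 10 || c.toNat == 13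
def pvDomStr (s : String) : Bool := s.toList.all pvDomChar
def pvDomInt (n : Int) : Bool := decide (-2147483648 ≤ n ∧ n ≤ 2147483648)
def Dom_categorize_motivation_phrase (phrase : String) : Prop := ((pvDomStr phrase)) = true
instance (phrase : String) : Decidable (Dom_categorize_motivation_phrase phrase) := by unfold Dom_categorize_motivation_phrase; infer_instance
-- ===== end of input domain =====

-- B replaces A's prioritized if/elif cascade by one flat scan over a keyword→rank map keeping a
-- running minimum rank, followed by a single indexed lookup: alternative decomposition, same cost.

-- ===== PORT A =====
def categorize_motivation_phrase (phrase : String) : String :=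
  if (["help", "helping", "support", "serve"]).any (fun w => PySem.Str.isIn w phrase) then
    "Helping_Service_Motivation"
  else if (["family", "personal", "experience", "parents"]).any (fun w => PySem.Str.isIn w phrase) then
    "Personal_Family_Influence"
  else if (["career", "path", "professional", "future"]).any (fun w => PySem.Str.isIn w phrase) then
    "Career_Development"
  else if (["difference", "impact", "change", "lives"]).any (fun w => PySem.Str.isIn w phrase) then
    "Impact_Motivation"
  else if (["responsibility", "important", "serious"]).any (fun w => PySem.Str.isIn w phrase) then
    "Responsibility_Awareness"
  else if (["connection", "emotional", "passionate"]).any (fun w => PySem.Str.isIn w phrase) then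
    "Emotional_Connection"
  else
    "Other_Motivation"

-- ===== PORT B =====
def keywordRank : List (String × Nat) :=
  [ ("help", 0), ("helping", 0), ("support", 0), ("serve", 0),
    ("family", 1), ("personal", 1), ("experience", 1), ("parents", 1),
    ("career", 2), ("path", 2), ("professional", 2), ("future", 2),
    ("difference", 3), ("impact", 3), ("change", 3), ("lives", 3),
    ("responsibility", 4), ("important", 4), ("serious", 4),
    ("connection", 5), ("emotional", 5), ("passionate", 5) ]

def categoryNames : List String :=
  [ "Helping_Service_Motivation", "Personal_Family_Influence", "Career_Development",
    "Impact_Motivation", "Responsibility_Awareness", "Emotional_Connection", "Other_Motivation" ]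

def categorize_motivation_phrase_alt (phrase : String) : String :=
  let best := keywordRank.foldl
    (fun best wr => if wr.2 < best ∧ PySem.Str.isIn wr.1 phrase then wr.2 else best)
    (categoryNames.length - 1)
  -- CATEGORY_NAMES[best]: best ≤ 6 always holds, so this index is in range and getD is exact
  categoryNames.getD best ""

-- ===== PRECONDITION & SPEC =====
def Spec_categorize_motivation_phrase (phrase : String) (out : String) : Prop := out = categorize_motivation_phrase_alt phrase
instance (phrase : String) (out : String) : Decidable (Spec_categorize_motivation_phrase phrase out) := by unfold Spec_categorize_motivation_phrase; infer_instance

-- ===== CLAIM (what is proved, stated in full; the proofs are below) =====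
def Claim_equal_categorize_motivation_phrase : Prop := ∀ (phrase : String), Dom_categorize_motivation_phrase phrase → Spec_categorize_motivation_phrase phrase (categorize_motivation_phrase phrase)

-- ===== LEMMAS AND PROOFS =====

-- B's loop body, named for the proofs
def pvF (phrase : String) : Nat → String × Nat → Nat :=
  fun best wr => if wr.2 < best ∧ PySem.Str.isIn wr.1 phrase then wr.2 else best

-- the six keyword groups of keywordRank
def pvG0 : List (String × Nat) := [("help", 0), ("helping", 0), ("support", 0), ("serve", 0)]
def pvG1 : List (String × Nat) := [("family", 1), ("personal", 1), ("experience", 1), ("parents", 1)]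
def pvG2 : List (String × Nat) := [("career", 2), ("path", 2), ("professional", 2), ("future", 2)]
def pvG3 : List (String × Nat) := [("difference", 3), ("impact", 3), ("change", 3), ("lives", 3)]
def pvG4 : List (String × Nat) := [("responsibility", 4), ("important", 4), ("serious", 4)]
def pvG5 : List (String × Nat) := [("connection", 5), ("emotional", 5), ("passionate", 5)]

-- once the running minimum is ≤ every remaining rank, the fold is constant
theorem pv_fold_ge (phrase : String) (l : List (String × Nat)) (b : Nat)
    (h : ∀ wr ∈ l, b ≤ wr.2) : l.foldl (pvF phrase) b = b := by
  induction l with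
  | nil => rfl
  | cons w t ih =>
    have hb := h w (by simp)
    have hw : pvF phrase b w = b := by
      simp only [pvF]
      rw [if_neg]
      rintro ⟨hlt, -⟩; omega
    rw [List.foldl_cons, hw]
    exact ih (fun wr hm => h wr (by simp [hm]))

-- over a group of entries that all carry rank r < b, the fold computes "r if any matched, else b"
theorem pv_fold_const (phrase : String) (l : List (String × Nat)) (r b : Nat)
    (hl : ∀ wr ∈ l, wr.2 = r) (hrb : r < b) :
    l.foldl (pvF phrase) b =
      if l.any (fun wr => PySem.Str.isIn wr.1 phrase) then r else b := by
  induction l with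
  | nil => simp
  | cons w t ih =>
    have hw : w.2 = r := hl w (by simp)
    by_cases hin : PySem.Str.isIn w.1 phrase
    · have hstep : pvF phrase b w = r := by
        simp only [pvF]; rw [if_pos ⟨by omega, hin⟩]; exact hw
      rw [List.foldl_cons, hstep]
      rw [pv_fold_ge phrase t r (fun wr hm => (hl wr (by simp [hm])) ▸ le_refl r)]
      rw [List.any_cons, hin, Bool.true_or, if_pos rfl]
    · have hstep : pvF phrase b w = b := by
        simp only [pvF]; rw [if_neg]; rintro ⟨-, h⟩; exact hin h
      rw [Bool.not_eq_true] at hin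
      rw [List.foldl_cons, hstep, ih (fun wr hm => hl wr (by simp [hm]))]
      rw [List.any_cons, hin, Bool.false_or]


-- a group whose word-list matched: the fold lands on its rank
theorem pv_group_hit (phrase : String) (g : List (String × Nat)) (ws : List String) (r b : Nat)
    (hg : g.any (fun wr => PySem.Str.isIn wr.1 phrase) = ws.any (fun w => PySem.Str.isIn w phrase))
    (hl : ∀ wr ∈ g, wr.2 = r) (hrb : r < b)
    (hc : ws.any (fun w => PySem.Str.isIn w phrase) = true) :
    g.foldl (pvF phrase) b = r := by
  rw [pv_fold_const phrase g r b hl hrb, hg, hc]; rfl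

-- a group whose word-list did not match: the fold keeps b
theorem pv_group_miss (phrase : String) (g : List (String × Nat)) (ws : List String) (r b : Nat)
    (hg : g.any (fun wr => PySem.Str.isIn wr.1 phrase) = ws.any (fun w => PySem.Str.isIn w phrase))
    (hl : ∀ wr ∈ g, wr.2 = r) (hrb : r < b)
    (hc : ¬ ws.any (fun w => PySem.Str.isIn w phrase) = true) :
    g.foldl (pvF phrase) b = b := by
  rw [Bool.not_eq_true] at hc
  rw [pv_fold_const phrase g r b hl hrb, hg, hc]; rfl

-- ===== VERDICT (by name: the statement is the Claim_ definition above) =====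
theorem categorize_motivation_phrase_spec : Claim_equal_categorize_motivation_phrase := by
  intro phrase _
  show categorize_motivation_phrase phrase = categorize_motivation_phrase_alt phrase
  have hKR : keywordRank = pvG0 ++ (pvG1 ++ (pvG2 ++ (pvG3 ++ (pvG4 ++ pvG5)))) := rfl
  have halt : categorize_motivation_phrase_alt phrase =
      categoryNames.getD (keywordRank.foldl (pvF phrase) 6) "" := rfl
  rw [halt, hKR]
  simp only [List.foldl_append]
  by_cases c0 : (["help", "helping", "support", "serve"]).any (fun w => PySem.Str.isIn w phrase) = true
  · rw [pv_group_hit phrase pvG0 (["help", "helping", "support", "serve"]) 0 6 rfl (by decide) (by norm_num) c0]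
    rw [pv_fold_ge phrase pvG1 0 (by decide)]
    rw [pv_fold_ge phrase pvG2 0 (by decide)]
    rw [pv_fold_ge phrase pvG3 0 (by decide)]
    rw [pv_fold_ge phrase pvG4 0 (by decide)]
    rw [pv_fold_ge phrase pvG5 0 (by decide)]
    rw [categorize_motivation_phrase, if_pos c0]; rfl
  rw [pv_group_miss phrase pvG0 (["help", "helping", "support", "serve"]) 0 6 rfl (by decide) (by norm_num) c0]
  by_cases c1 : (["family", "personal", "experience", "parents"]).any (fun w => PySem.Str.isIn w phrase) = true
  · rw [pv_group_hit phrase pvG1 (["family", "personal", "experience", "parents"]) 1 6 rfl (by decide) (by norm_num) c1]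
    rw [pv_fold_ge phrase pvG2 1 (by decide)]
    rw [pv_fold_ge phrase pvG3 1 (by decide)]
    rw [pv_fold_ge phrase pvG4 1 (by decide)]
    rw [pv_fold_ge phrase pvG5 1 (by decide)]
    rw [categorize_motivation_phrase, if_neg c0, if_pos c1]; rfl
  rw [pv_group_miss phrase pvG1 (["family", "personal", "experience", "parents"]) 1 6 rfl (by decide) (by norm_num) c1]
  by_cases c2 : (["career", "path", "professional", "future"]).any (fun w => PySem.Str.isIn w phrase) = true
  · rw [pv_group_hit phrase pvG2 (["career", "path", "professional", "future"]) 2 6 rfl (by decide) (by norm_num) c2]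
    rw [pv_fold_ge phrase pvG3 2 (by decide)]
    rw [pv_fold_ge phrase pvG4 2 (by decide)]
    rw [pv_fold_ge phrase pvG5 2 (by decide)]
    rw [categorize_motivation_phrase, if_neg c0, if_neg c1, if_pos c2]; rfl
  rw [pv_group_miss phrase pvG2 (["career", "path", "professional", "future"]) 2 6 rfl (by decide) (by norm_num) c2]
  by_cases c3 : (["difference", "impact", "change", "lives"]).any (fun w => PySem.Str.isIn w phrase) = true
  · rw [pv_group_hit phrase pvG3 (["difference", "impact", "change", "lives"]) 3 6 rfl (by decide) (by norm_num) c3]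
    rw [pv_fold_ge phrase pvG4 3 (by decide)]
    rw [pv_fold_ge phrase pvG5 3 (by decide)]
    rw [categorize_motivation_phrase, if_neg c0, if_neg c1, if_neg c2, if_pos c3]; rfl
  rw [pv_group_miss phrase pvG3 (["difference", "impact", "change", "lives"]) 3 6 rfl (by decide) (by norm_num) c3]
  by_cases c4 : (["responsibility", "important", "serious"]).any (fun w => PySem.Str.isIn w phrase) = true
  · rw [pv_group_hit phrase pvG4 (["responsibility", "important", "serious"]) 4 6 rfl (by decide) (by norm_num) c4]
    rw [pv_fold_ge phrase pvG5 4 (by decide)]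
    rw [categorize_motivation_phrase, if_neg c0, if_neg c1, if_neg c2, if_neg c3, if_pos c4]; rfl
  rw [pv_group_miss phrase pvG4 (["responsibility", "important", "serious"]) 4 6 rfl (by decide) (by norm_num) c4]
  by_cases c5 : (["connection", "emotional", "passionate"]).any (fun w => PySem.Str.isIn w phrase) = true
  · rw [pv_group_hit phrase pvG5 (["connection", "emotional", "passionate"]) 5 6 rfl (by decide) (by norm_num) c5]
    rw [categorize_motivation_phrase, if_neg c0, if_neg c1, if_neg c2, if_neg c3, if_neg c4, if_pos c5]; rfl
  rw [pv_group_miss phrase pvG5 (["connection", "emotional", "passionate"]) 5 6 rfl (by decide) (by norm_num) c5]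
  rw [categorize_motivation_phrase, if_neg c0, if_neg c1, if_neg c2, if_neg c3, if_neg c4, if_neg c5]
  rfl
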